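-- pv_equiv track=rewrite | github.com/edyquintero/Compilers | compiler.py | extraerNumero
-- ===== SOURCE A (Python) =====
-- def extraerNumero(input, pos):
--     lexema = []
--     while pos < len(input) and input[pos].isdigit():
--         lexema.append(input[pos])
--         pos += 1
--     if pos < len(input) and input[pos] == '.':
--         lexema.append(input[pos])
--         pos += 1
--         while pos < len(input) and input[pos].isdigit():
--             lexema.append(input[pos])
--             pos += 1
--     return ''.join(lexema), pos
-- ===== SOURCE B (Python) =====
-- def extraerNumero(input, pos):
--     n = len(input)
--     end = pos
--     dot = False
--     while end < n:
--         c = input[end]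
--         if c.isdigit():
--             end += 1
--         elif c == '.' and not dot:
--             dot = True
--             end += 1
--         else:
--             break
--     return ''.join(input[p] for p in range(pos, end)), end
-- ===== Notes on version B (the rewrite author's own statement) =====
-- stated objective: alternative
-- what changed: B first computes only the end position with a single dot-flag scan that accumulates nothing, then materialises the lexeme in a second pass over range(pos, end), instead of A's two sequential digit loops that append characters as they go.
import Mathlib
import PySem

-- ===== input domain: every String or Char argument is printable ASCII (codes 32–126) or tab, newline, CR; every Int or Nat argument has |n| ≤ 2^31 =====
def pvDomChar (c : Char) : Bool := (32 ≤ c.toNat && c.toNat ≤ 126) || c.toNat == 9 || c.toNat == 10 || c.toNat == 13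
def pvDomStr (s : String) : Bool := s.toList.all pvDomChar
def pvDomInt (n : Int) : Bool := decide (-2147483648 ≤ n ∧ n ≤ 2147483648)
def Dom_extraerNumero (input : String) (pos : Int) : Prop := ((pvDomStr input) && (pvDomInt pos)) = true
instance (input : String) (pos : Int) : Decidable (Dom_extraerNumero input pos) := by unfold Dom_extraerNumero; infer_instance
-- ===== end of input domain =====

-- B computes the end position first (no accumulation) and then materialises the lexeme
-- in a second pass; A appends characters while scanning with two sequential digit loops.
-- ===== PORT A =====
-- A: scan digits appending to lexema; then if a '.' follows, append it and scan digits again.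
def loopDigits (s : List Char) (pos : Int) (acc : List Char) : List Char × Int :=
  if _h : pos < (s.length : Int) then
    match PySem.List.pyGet? s pos with
    | some c =>
      if PySem.Chars.isdigit c then loopDigits s (pos + 1) (acc ++ [c]) else (acc, pos)
    | none => (acc, pos)   -- Python raises IndexError here; excluded by Pre_
  else (acc, pos)
termination_by ((s.length : Int) - pos).toNat
decreasing_by omega

def extraerNumero (input : String) (pos : Int) : String × Int :=
  let s := input.toList
  let r := loopDigits s pos []
  let r2 :=
    if _h : r.2 < (s.length : Int) then
      match PySem.List.pyGet? s r.2 with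
      | some c => if c = '.' then loopDigits s (r.2 + 1) (r.1 ++ [c]) else r
      | none => r   -- Python raises IndexError here; excluded by Pre_
    else r
  (String.ofList r2.1, r2.2)

-- ===== PORT B =====
-- B, phase 1: advance `end` over digits and at most one '.', accumulating nothing.
def findEnd (s : List Char) (e : Int) (dot : Bool) : Int :=
  if _h : e < (s.length : Int) then
    match PySem.List.pyGet? s e with
    | some c =>
      if PySem.Chars.isdigit c then findEnd s (e + 1) dot
      else if c = '.' ∧ dot = false then findEnd s (e + 1) true
      else e
    | none => e   -- Python raises IndexError here; excluded by Pre_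
  else e
termination_by ((s.length : Int) - e).toNat
decreasing_by all_goals omega

-- B, phase 2: ''.join(input[p] for p in range(pos, end)); inside Pre_ every visited
-- index is in range, so pyGet? is `some` and filterMap keeps exactly those characters.
def segB (s : List Char) (a b : Int) : List Char :=
  (PySem.List.pyRange a b 1).filterMap (PySem.List.pyGet? s)

def extraerNumero_alt (input : String) (pos : Int) : String × Int :=
  let s := input.toList
  let e := findEnd s pos false
  (String.ofList (segB s pos e), e)

-- ===== PRECONDITION & SPEC =====
-- Pre_ excludes exactly the inputs with pos < -len(input), where Python A raises IndexError.
def Pre_extraerNumero (input : String) (pos : Int) : Prop := -(PySem.Str.len input) ≤ pos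
instance (input : String) (pos : Int) : Decidable (Pre_extraerNumero input pos) := by unfold Pre_extraerNumero; infer_instance
def pvWitness_extraerNumero : String × Int := ("3.14x", 0)
def Spec_extraerNumero (input : String) (pos : Int) (out : String × Int) : Prop := out = extraerNumero_alt input pos
instance (input : String) (pos : Int) (out : String × Int) : Decidable (Spec_extraerNumero input pos out) := by unfold Spec_extraerNumero; infer_instance

-- ===== CLAIM (what is proved, stated in full; the proofs are below) =====
def Claim_equal_extraerNumero : Prop := ∀ (input : String) (pos : Int), Dom_extraerNumero input pos → Pre_extraerNumero input pos → Spec_extraerNumero input pos (extraerNumero input pos)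

-- ===== LEMMAS AND PROOFS =====

theorem findEnd_ge (s : List Char) (e : Int) (dot : Bool) : e ≤ findEnd s e dot := by
  unfold findEnd
  split
  · split
    · split
      · have := findEnd_ge s (e + 1) dot; omega
      · split
        · have := findEnd_ge s (e + 1) true; omega
        · omega
    · omega
  · omega
termination_by ((s.length : Int) - e).toNat
decreasing_by all_goals omega

theorem segB_nil (s : List Char) (a : Int) : segB s a a = [] := by
  simp [segB, PySem.List.pyRange_one_eq_nil le_rfl]

-- A's digit loop = (acc ++ the characters of [pos, findEnd s pos true), that end position).
theorem loopDigits_eq (s : List Char) (pos : Int) (acc : List Char) :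
    loopDigits s pos acc = (acc ++ segB s pos (findEnd s pos true), findEnd s pos true) := by
  rw [loopDigits, findEnd]
  split
  · rename_i h
    cases hg : PySem.List.pyGet? s pos with
    | none => simp [segB_nil]
    | some c =>
      simp only
      split
      · rename_i hd
        rw [loopDigits_eq s (pos + 1) (acc ++ [c])]
        have h1 : pos < findEnd s (pos + 1) true := by
          have := findEnd_ge s (pos + 1) true; omega
        have : segB s pos (findEnd s (pos + 1) true)
            = c :: segB s (pos + 1) (findEnd s (pos + 1) true) := by
          simp [segB, PySem.List.pyRange_one_cons h1, hg]
        simp [this]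
      · rename_i hd
        simp [segB_nil]
  · simp [segB_nil]
termination_by ((s.length : Int) - pos).toNat
decreasing_by omega

-- B's flag loop = A's digit loop, then A's dot branch on its end position.
theorem findEnd_false_eq (s : List Char) (pos : Int) :
    findEnd s pos false =
      (let e := findEnd s pos true
       if e < (s.length : Int) then
         match PySem.List.pyGet? s e with
         | some c => if c = '.' then findEnd s (e + 1) true else e
         | none => e
       else e) := by
  conv_lhs => rw [findEnd]
  split
  · rename_i h
    cases hg : PySem.List.pyGet? s pos with
    | none =>
      have he : findEnd s pos true = pos := by rw [findEnd]; simp [h, hg]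
      simp [he, h, hg]
    | some c =>
      simp only
      split
      · rename_i hd
        have he : findEnd s pos true = findEnd s (pos + 1) true := by
          conv_lhs => rw [findEnd]
          simp [h, hg, hd]
        rw [findEnd_false_eq s (pos + 1), ← he]
      · rename_i hd
        have he : findEnd s pos true = pos := by
          rw [findEnd]; simp [h, hg, hd]
        split
        · rename_i hdot
          simp [he, h, hg, hdot.1]
        · rename_i hdot
          simp only [not_and] at hdot
          by_cases hc : c = '.'
          · simp [hc] at hdot ⊢
          · simp [he, h, hg, hc]
  · rename_i h
    have he : findEnd s pos true = pos := by rw [findEnd]; simp [h]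
    simp [he, h]
termination_by ((s.length : Int) - pos).toNat
decreasing_by omega

-- Splitting B's segment at the first-loop end and peeling the dot character.
theorem segB_split_dot (s : List Char) (pos e1 e2 : Int)
    (h1 : pos ≤ e1) (h2 : e1 + 1 ≤ e2) (hg : PySem.List.pyGet? s e1 = some '.') :
    segB s pos e2 = segB s pos e1 ++ '.' :: segB s (e1 + 1) e2 := by
  have hsplit := PySem.List.pyRange_one_append pos e1 e2 h1 (by omega)
  have hcons : PySem.List.pyRange e1 e2 1 = e1 :: PySem.List.pyRange (e1 + 1) e2 1 :=
    PySem.List.pyRange_one_cons (by omega)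
  simp [segB, hsplit, hcons, List.filterMap_append, hg]

-- ===== VERDICT (by name: the statement is the Claim_ definition above) =====
theorem extraerNumero_spec : Claim_equal_extraerNumero := by
  intro input pos _ _
  unfold Spec_extraerNumero extraerNumero extraerNumero_alt
  simp only [findEnd_false_eq, loopDigits_eq]
  split
  · rename_i h
    cases hg : PySem.List.pyGet? input.toList (findEnd input.toList pos true) with
    | none => simp
    | some c =>
      simp only
      by_cases hc : c = '.'
      · subst hc
        have h1 := findEnd_ge input.toList pos true
        have h2 := findEnd_ge input.toList (findEnd input.toList pos true + 1) true
        simp only [reduceIte]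
        rw [segB_split_dot input.toList pos (findEnd input.toList pos true)
          (findEnd input.toList (findEnd input.toList pos true + 1) true) h1 (by omega) hg]
        simp
      · simp [hc]
  · rfl
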